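-- pv_equiv track=rewrite | github.com/sakshidalmiya02/Leetcode | Surround the 1's - GFG/surround-the-1s.py | Count
-- ===== SOURCE A (Python) =====
-- def Count(matrix):
-- 	# Code here
-- 	n=len(matrix)
-- 	m=len(matrix[0])
-- 	z=[(0,1),(0,-1),(1,0),(-1,0),(1,1),(-1,-1),(-1,1),(1,-1)]
-- 	ans=0
-- 	for i in range(n):
-- 	    for j in range(m):
-- 	        if matrix[i][j]==1:
-- 	            flag=0
-- 	            for x,y in z:
-- 	                X=x+i
-- 	                Y=y+j
-- 	                if 0<=X<n and 0<=Y<m and matrix[X][Y]==0: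
-- 	                    flag+=1
-- 	            if flag%2==0 and flag!=0:
--
-- 	                ans+=1
-- 	return ans
-- ===== SOURCE B (Python) =====
-- def Count(matrix):
--     n = len(matrix)
--     m = len(matrix[0])
--     offs = ((0, 1), (0, -1), (1, 0), (-1, 0), (1, 1), (-1, -1), (-1, 1), (1, -1))
--     # Pass 1: every 0-cell pushes one credit to each in-bounds neighbour.
--     cnt = {}
--     for i in range(n):
--         for j in range(m):
--             if matrix[i][j] == 0:
--                 for x, y in offs:
--                     X, Y = x + i, y + j
--                     if 0 <= X < n and 0 <= Y < m:
--                         cnt[(X, Y)] = cnt.get((X, Y), 0) + 1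
--     # Pass 2: count the 1-cells whose collected credit is even and nonzero.
--     ans = 0
--     for i in range(n):
--         for j in range(m):
--             if matrix[i][j] == 1:
--                 c = cnt.get((i, j), 0)
--                 if c % 2 == 0 and c != 0:
--                     ans += 1
--     return ans
-- ===== Notes on version B (the rewrite author's own statement) =====
-- stated objective: alternative
-- what changed: Replaces A's per-1-cell gather of its 8 neighbours by a scatter pass: each 0-cell pushes a credit into a dict keyed by in-bounds neighbour coordinates, and a second pass counts 1-cells whose credit is even and nonzero.
import Mathlib
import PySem

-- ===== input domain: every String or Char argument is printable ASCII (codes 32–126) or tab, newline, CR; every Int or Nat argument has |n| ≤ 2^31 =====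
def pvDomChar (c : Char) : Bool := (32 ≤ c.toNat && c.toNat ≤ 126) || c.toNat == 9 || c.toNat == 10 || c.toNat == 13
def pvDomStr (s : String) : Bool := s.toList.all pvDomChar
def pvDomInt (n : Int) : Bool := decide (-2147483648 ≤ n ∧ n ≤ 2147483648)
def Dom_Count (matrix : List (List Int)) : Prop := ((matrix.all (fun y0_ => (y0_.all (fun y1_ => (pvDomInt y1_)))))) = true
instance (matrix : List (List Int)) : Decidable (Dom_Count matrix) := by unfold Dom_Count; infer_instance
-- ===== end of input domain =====

-- B replaces A's per-1-cell gather of its 8 neighbours by a scatter pass (each 0-cell pushes a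
-- credit into a dict keyed by its in-bounds neighbours) plus a separate counting pass (alternative
-- decomposition, same asymptotic cost).

-- shared element access: matrix[i][j] (both Pythons read cells exactly this way)
def matAt (matrix : List (List Int)) (i j : Int) : Int :=
  PySem.List.pyGetD (PySem.List.pyGetD matrix i []) j 0

-- the 8 neighbour offsets, the tuple literal both Pythons carry
def zOffs : List (Int × Int) := [(0,1),(0,-1),(1,0),(-1,0),(1,1),(-1,-1),(-1,1),(1,-1)]

-- ===== PORT A =====
def Count (matrix : List (List Int)) : Int :=
  let n : Int := matrix.length
  let m : Int := (PySem.List.pyGetD matrix 0 []).length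
  (PySem.List.pyRange 0 n 1).foldl (fun ans i =>
    (PySem.List.pyRange 0 m 1).foldl (fun ans j =>
      if matAt matrix i j = 1 then
        let flag : Int := zOffs.foldl (fun flag o =>
          let X := o.1 + i
          let Y := o.2 + j
          if 0 ≤ X ∧ X < n ∧ 0 ≤ Y ∧ Y < m ∧ matAt matrix X Y = 0 then flag + 1 else flag) 0
        if PySem.Int.mod flag 2 = 0 ∧ flag ≠ 0 then ans + 1 else ans
      else ans) ans) 0

-- ===== PORT B =====
def Count_alt (matrix : List (List Int)) : Int :=
  let n : Int := matrix.length
  let m : Int := (PySem.List.pyGetD matrix 0 []).length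
  let cnt : PySem.Dict (Int × Int) Int :=
    (PySem.List.pyRange 0 n 1).foldl (fun cnt i =>
      (PySem.List.pyRange 0 m 1).foldl (fun cnt j =>
        if matAt matrix i j = 0 then
          zOffs.foldl (fun cnt o =>
            let X := o.1 + i
            let Y := o.2 + j
            if 0 ≤ X ∧ X < n ∧ 0 ≤ Y ∧ Y < m then
              cnt.insert (X, Y) (cnt.getD (X, Y) 0 + 1)
            else cnt) cnt
        else cnt) cnt) PySem.Dict.empty
  (PySem.List.pyRange 0 n 1).foldl (fun ans i =>
    (PySem.List.pyRange 0 m 1).foldl (fun ans j =>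
      if matAt matrix i j = 1 then
        let c : Int := cnt.getD (i, j) 0
        if PySem.Int.mod c 2 = 0 ∧ c ≠ 0 then ans + 1 else ans
      else ans) ans) 0

-- ===== PRECONDITION & SPEC =====
-- Pre_: exactly the inputs where the Python A returns: a nonempty matrix (else matrix[0] raises
-- IndexError) whose every row has at least len(matrix[0]) entries (else matrix[i][j] raises).
def Pre_Count (matrix : List (List Int)) : Prop :=
  matrix ≠ [] ∧ ∀ row ∈ matrix, (matrix.headD []).length ≤ row.length
instance (matrix : List (List Int)) : Decidable (Pre_Count matrix) := by unfold Pre_Count; infer_instance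
def pvWitness_Count : List (List Int) := [[1, 0], [0, 1]]

def Spec_Count (matrix : List (List Int)) (out : Int) : Prop := out = Count_alt matrix
instance (matrix : List (List Int)) (out : Int) : Decidable (Spec_Count matrix out) := by unfold Spec_Count; infer_instance

-- ===== CLAIM (what is proved, stated in full; the proofs are below) =====
def Claim_equal_Count : Prop := ∀ (matrix : List (List Int)), Dom_Count matrix → Pre_Count matrix → Spec_Count matrix (Count matrix)


-- ===== LEMMAS AND PROOFS =====

-- 0/1 indicator of "in-bounds zero cell", the quantity both programs exchange
def zeroInd (M : List (List Int)) (n m i j : Int) : Int :=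
  if 0 ≤ i ∧ i < n ∧ 0 ≤ j ∧ j < m ∧ matAt M i j = 0 then 1 else 0

-- A's inner flag loop, as it stands in the port after zeta-reducing the lets
def flagAt (M : List (List Int)) (n m i j : Int) : Int :=
  zOffs.foldl (fun flag o =>
    if 0 ≤ o.1 + i ∧ o.1 + i < n ∧ 0 ≤ o.2 + j ∧ o.2 + j < m ∧ matAt M (o.1 + i) (o.2 + j) = 0
    then flag + 1 else flag) 0

-- the list of neighbour keys one cell scatters to (B's inner loop, as data)
def keyList (M : List (List Int)) (n m i j : Int) : List (Int × Int) :=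
  if matAt M i j = 0 then
    zOffs.filterMap (fun o =>
      if 0 ≤ o.1 + i ∧ o.1 + i < n ∧ 0 ≤ o.2 + j ∧ o.2 + j < m
      then some (o.1 + i, o.2 + j) else none)
  else []

-- all keys B's first pass scatters, in order
def bigK (M : List (List Int)) (n m : Int) : List (Int × Int) :=
  (PySem.List.pyRange 0 n 1).flatMap (fun i =>
    (PySem.List.pyRange 0 m 1).flatMap (fun j => keyList M n m i j))

theorem ite_add_one (P : Prop) [Decidable P] (x : Int) :
    (if P then x + 1 else x) = x + (if P then 1 else 0) := by split <;> ring

theorem flag_eq (M : List (List Int)) (n m i j : Int) :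
    flagAt M n m i j
      = zeroInd M n m i (1+j) + zeroInd M n m i (-1+j) + zeroInd M n m (1+i) j
        + zeroInd M n m (-1+i) j + zeroInd M n m (1+i) (1+j) + zeroInd M n m (-1+i) (-1+j)
        + zeroInd M n m (-1+i) (1+j) + zeroInd M n m (1+i) (-1+j) := by
  simp only [flagAt, zOffs, List.foldl_cons, List.foldl_nil, ite_add_one, zeroInd, zero_add]

-- generic: a fold whose step conditionally applies g to a derived key is the fold of g
-- over the guarded filterMap of keys
theorem foldl_ite_step {A B K : Type} (l : List A) (p : A -> Prop) [DecidablePred p]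
    (k : A -> K) (g : B -> K -> B) (init : B) :
    l.foldl (fun d x => if p x then g d (k x) else d) init
      = (l.filterMap (fun x => if p x then some (k x) else none)).foldl g init := by
  induction l generalizing init with
  | nil => rfl
  | cons x xs ih => by_cases h : p x <;> simp [h, ih]

theorem count_flatMap_sum {A K : Type} [BEq K] (l : List A) (f : A -> List K) (t : K) :
    (((l.flatMap f).count t : Int)) = (l.map (fun x => ((f x).count t : Int))).sum := by
  induction l with
  | nil => rfl
  | cons x xs ih => simp [List.count_append, ih]

theorem count_filterMap_guard {A K : Type} [BEq K] [LawfulBEq K] [DecidableEq K] (l : List A) (p : A -> Prop)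
    [DecidablePred p] (k : A -> K) (t : K) :
    (((l.filterMap (fun x => if p x then some (k x) else none)).count t : Int))
      = (l.map (fun x => if p x ∧ k x = t then (1 : Int) else 0)).sum := by
  induction l with
  | nil => rfl
  | cons x xs ih =>
    by_cases h : p x
    · by_cases h2 : k x = t
      · simp [h, h2, ih]; ring
      · simp [h, h2, ih]
    · simp [h, ih]

theorem sum_swap_list {A B : Type} (l : List A) (r : List B) (f : A -> B -> Int) :
    (l.map (fun a => (r.map (fun b => f a b)).sum)).sum
      = (r.map (fun b => (l.map (fun a => f a b)).sum)).sum := by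
  induction l with
  | nil => simp
  | cons x xs ih => simp [ih]

theorem sum_range_single (K : Nat) (c : Int) (f : Int -> Int)
    (h0 : ∀ i : Nat, i < K → (i : Int) ≠ c → f i = 0) :
    ((List.range K).map (fun i : Nat => f (i : Int))).sum = if 0 ≤ c ∧ c < (K : Int) then f c else 0 := by
  induction K with
  | zero => simp
  | succ k ih =>
    rw [List.range_succ, List.map_append, List.sum_append]
    by_cases hc : (k : Int) = c
    · rw [ih (fun i hi hne => h0 i (by omega) hne)]
      have h1 : ¬ (0 ≤ c ∧ c < (k : Int)) := by omega
      rw [if_neg h1, if_pos (by push_cast; omega)]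
      simp [hc]
    · rw [ih (fun i hi hne => h0 i (by omega) hne)]
      simp only [List.map_cons, List.map_nil, List.sum_cons, List.sum_nil,
        h0 k (by omega) hc, add_zero]
      by_cases h : 0 ≤ c ∧ c < (k : Int)
      · rw [if_pos h, if_pos (by push_cast; omega)]
      · rw [if_neg h, if_neg (by push_cast; omega)]

theorem sum_pyRange_single (k c : Int) (f : Int -> Int)
    (h0 : ∀ i, 0 ≤ i → i < k → i ≠ c → f i = 0) :
    ((PySem.List.pyRange 0 k 1).map f).sum = if 0 ≤ c ∧ c < k then f c else 0 := by
  rw [PySem.List.pyRange_one]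
  simp only [List.map_map, Function.comp_def, zero_add, sub_zero]
  rw [sum_range_single k.toNat c f (fun i hi hne => h0 i (by omega) (by omega) hne)]
  by_cases h : 0 ≤ c ∧ c < k
  · rw [if_pos (by omega), if_pos h]
  · rw [if_neg (by omega), if_neg h]

-- the double sum of one offset's scattered indicator collapses to one zero-cell indicator
theorem collapse (M : List (List Int)) (n m x y a b : Int)
    (ha : 0 ≤ a) (ha' : a < n) (hb : 0 ≤ b) (hb' : b < m) :
    ((PySem.List.pyRange 0 n 1).map (fun i =>
        ((PySem.List.pyRange 0 m 1).map (fun j =>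
          if matAt M i j = 0 ∧ 0 ≤ x + i ∧ x + i < n ∧ 0 ≤ y + j ∧ y + j < m
             ∧ x + i = a ∧ y + j = b then (1 : Int) else 0)).sum)).sum
      = zeroInd M n m (a - x) (b - y) := by
  have h0 : ∀ i, 0 ≤ i → i < n → i ≠ a - x →
      ((PySem.List.pyRange 0 m 1).map (fun j =>
        if matAt M i j = 0 ∧ 0 ≤ x + i ∧ x + i < n ∧ 0 ≤ y + j ∧ y + j < m
           ∧ x + i = a ∧ y + j = b then (1 : Int) else 0)).sum = 0 := by
    intro i _ _ hne
    apply List.sum_eq_zero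
    intro t ht
    rcases List.mem_map.1 ht with ⟨j, hj, rfl⟩
    rw [if_neg]
    rintro ⟨-, -, -, -, -, hxa, -⟩
    exact hne (by omega)
  rw [sum_pyRange_single n (a - x) _ h0]
  by_cases hx : 0 ≤ a - x ∧ a - x < n
  · have h1 : ∀ j, 0 ≤ j → j < m → j ≠ b - y →
        (if matAt M (a - x) j = 0 ∧ 0 ≤ x + (a - x) ∧ x + (a - x) < n ∧ 0 ≤ y + j ∧ y + j < m
            ∧ x + (a - x) = a ∧ y + j = b then (1 : Int) else 0) = 0 := by
      intro j _ _ hne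
      rw [if_neg]
      rintro ⟨-, -, -, -, -, -, hyb⟩
      exact hne (by omega)
    rw [if_pos hx, sum_pyRange_single m (b - y) _ h1]
    by_cases hy : 0 ≤ b - y ∧ b - y < m
    · rw [if_pos hy]
      simp only [zeroInd]
      by_cases hm : matAt M (a - x) (b - y) = 0
      · rw [if_pos ⟨hm, by omega, by omega, by omega, by omega, by omega, by omega⟩,
          if_pos ⟨hx.1, hx.2, hy.1, hy.2, hm⟩]
      · rw [if_neg (by rintro ⟨h1, -⟩; exact hm h1), if_neg (by rintro ⟨-, -, -, -, h5⟩; exact hm h5)]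
    · rw [if_neg hy, zeroInd, if_neg (by rintro ⟨-, -, h3, h4, -⟩; exact hy ⟨h3, h4⟩)]
  · rw [if_neg hx, zeroInd, if_neg (by rintro ⟨h1, h2, -⟩; exact hx ⟨h1, h2⟩)]

theorem zeroInd_congr (M : List (List Int)) (n m : Int) {i j i' j' : Int}
    (hi : i = i') (hj : j = j') : zeroInd M n m i j = zeroInd M n m i' j' := by
  rw [hi, hj]

-- one cell's contribution to key (a, b), as a sum over the 8 offsets
theorem keyList_count (M : List (List Int)) (n m i j a b : Int) :
    ((keyList M n m i j).count (a, b) : Int)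
      = (zOffs.map (fun o =>
          if matAt M i j = 0 ∧ 0 ≤ o.1 + i ∧ o.1 + i < n ∧ 0 ≤ o.2 + j ∧ o.2 + j < m
             ∧ o.1 + i = a ∧ o.2 + j = b then (1 : Int) else 0)).sum := by
  by_cases hm : matAt M i j = 0
  · rw [keyList, if_pos hm]
    refine (count_filterMap_guard zOffs
      (fun o => 0 ≤ o.1 + i ∧ o.1 + i < n ∧ 0 ≤ o.2 + j ∧ o.2 + j < m)
      (fun o => (o.1 + i, o.2 + j)) (a, b)).trans ?_
    apply congrArg
    apply List.map_congr_left
    intro o _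
    by_cases hg : (0 ≤ o.1 + i ∧ o.1 + i < n ∧ 0 ≤ o.2 + j ∧ o.2 + j < m) ∧
        ((o.1 + i, o.2 + j) : Int × Int) = (a, b)
    · obtain ⟨e1, e2⟩ := Prod.mk.injEq (o.1 + i) (o.2 + j) a b ▸ hg.2
      rw [if_pos hg, if_pos ⟨hm, hg.1.1, hg.1.2.1, hg.1.2.2.1, hg.1.2.2.2, e1, e2⟩]
    · rw [if_neg hg, if_neg]
      rintro ⟨-, g1, g2, g3, g4, e1, e2⟩
      exact hg ⟨⟨g1, g2, g3, g4⟩, by rw [e1, e2]⟩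
  · rw [keyList, if_neg hm]
    rw [show ((([] : List (Int × Int)).count (a, b) : Int)) = 0 from rfl]
    symm
    apply List.sum_eq_zero
    intro v hv
    rcases List.mem_map.1 hv with ⟨o, _, rfl⟩
    rw [if_neg (by rintro ⟨h1, -⟩; exact hm h1)]

-- total number of credits B scatters onto an in-range cell = A's flag there
theorem bigK_count (M : List (List Int)) (n m a b : Int)
    (ha : 0 ≤ a) (ha' : a < n) (hb : 0 ≤ b) (hb' : b < m) :
    (((bigK M n m).count (a, b) : Int)) = flagAt M n m a b := by
  rw [bigK, count_flatMap_sum]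
  rw [List.map_congr_left (fun i _ =>
    count_flatMap_sum (PySem.List.pyRange 0 m 1) (fun j => keyList M n m i j) ((a, b) : Int × Int))]
  rw [List.map_congr_left (fun i _ => congrArg List.sum
    (List.map_congr_left (fun j _ => keyList_count M n m i j a b)))]
  -- swap the offset sum outwards, innermost first
  rw [List.map_congr_left (fun i _ => sum_swap_list (PySem.List.pyRange 0 m 1) zOffs
    (fun j o => if matAt M i j = 0 ∧ 0 ≤ o.1 + i ∧ o.1 + i < n ∧ 0 ≤ o.2 + j ∧ o.2 + j < m
        ∧ o.1 + i = a ∧ o.2 + j = b then (1 : Int) else 0))]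
  rw [sum_swap_list (PySem.List.pyRange 0 n 1) zOffs
    (fun i o => ((PySem.List.pyRange 0 m 1).map (fun j =>
      if matAt M i j = 0 ∧ 0 ≤ o.1 + i ∧ o.1 + i < n ∧ 0 ≤ o.2 + j ∧ o.2 + j < m
         ∧ o.1 + i = a ∧ o.2 + j = b then (1 : Int) else 0)).sum)]
  rw [List.map_congr_left (fun (o : Int × Int) _ =>
    collapse M n m o.1 o.2 a b ha ha' hb hb')]
  simp only [zOffs, List.map_cons, List.map_nil, List.sum_cons, List.sum_nil, add_zero]
  rw [flag_eq]
  rw [zeroInd_congr M n m (show a - 0 = a by ring) (show b - 1 = -1 + b by ring),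
      zeroInd_congr M n m (show a - 0 = a by ring) (show b - -1 = 1 + b by ring),
      zeroInd_congr M n m (show a - 1 = -1 + a by ring) (show b - 0 = b by ring),
      zeroInd_congr M n m (show a - -1 = 1 + a by ring) (show b - 0 = b by ring),
      zeroInd_congr M n m (show a - 1 = -1 + a by ring) (show b - 1 = -1 + b by ring),
      zeroInd_congr M n m (show a - -1 = 1 + a by ring) (show b - -1 = 1 + b by ring),
      zeroInd_congr M n m (show a - -1 = 1 + a by ring) (show b - 1 = -1 + b by ring),
      zeroInd_congr M n m (show a - 1 = -1 + a by ring) (show b - -1 = 1 + b by ring)]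
  ring

-- B's accumulated dict is the flat counter fold over bigK
theorem cnt_eq (M : List (List Int)) (n m : Int) :
    ((PySem.List.pyRange 0 n 1).foldl (fun cnt i =>
      (PySem.List.pyRange 0 m 1).foldl (fun cnt j =>
        if matAt M i j = 0 then
          zOffs.foldl (fun (cnt : PySem.Dict (Int × Int) Int) o =>
            if 0 ≤ o.1 + i ∧ o.1 + i < n ∧ 0 ≤ o.2 + j ∧ o.2 + j < m then
              cnt.insert (o.1 + i, o.2 + j) (cnt.getD (o.1 + i, o.2 + j) 0 + 1)
            else cnt) cnt
        else cnt) cnt) PySem.Dict.empty)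
      = (bigK M n m).foldl (fun d k => d.insert k (d.getD k 0 + 1)) PySem.Dict.empty := by
  rw [bigK, List.foldl_flatMap]
  apply PySem.List.foldl_congr_mem
  intro acc i _
  rw [List.foldl_flatMap]
  apply PySem.List.foldl_congr_mem
  intro acc2 j _
  by_cases hm : matAt M i j = 0
  · rw [if_pos hm, keyList, if_pos hm,
      foldl_ite_step zOffs (fun o => 0 ≤ o.1 + i ∧ o.1 + i < n ∧ 0 ≤ o.2 + j ∧ o.2 + j < m)
        (fun o => (o.1 + i, o.2 + j)) (fun d k => d.insert k (d.getD k 0 + 1)) acc2]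
  · rw [if_neg hm, keyList, if_neg hm, List.foldl_nil]

-- the ports agree on every input (the matAt accessor is total)
theorem count_eq_all (M : List (List Int)) : Count M = Count_alt M := by
  simp only [Count, Count_alt]
  rw [cnt_eq]
  apply PySem.List.foldl_congr_mem
  intro acc i hi
  apply PySem.List.foldl_congr_mem
  intro acc2 j hj
  have hi' := PySem.List.mem_pyRange_one.1 hi
  have hj' := PySem.List.mem_pyRange_one.1 hj
  by_cases h1 : matAt M i j = 1
  · rw [if_pos h1, if_pos h1, PySem.Dict.getD_foldl_insert_add_one, PySem.Dict.getD_empty,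
      zero_add, bigK_count M (M.length : Int) ((PySem.List.pyGetD M 0 []).length : Int) i j
        hi'.1 hi'.2 hj'.1 hj'.2]
    rfl
  · rw [if_neg h1, if_neg h1]

-- ===== VERDICT (by name: the statement is the Claim_ definition above) =====
theorem Count_spec : Claim_equal_Count := by
  intro M _ _
  show Count M = Count_alt M
  exact count_eq_all M
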